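-- pv_equiv track=rewrite | github.com/noahensley/pokescore | src/UIInfo.py | capitalize_form_label
-- ===== SOURCE A (Python) =====
-- def capitalize_form_label(name):
--     """
--     Checks the supplied name for a form label and properly capitalizes it AND the Pokémon name
--     (including hyphenated names).  If there is no form label, only the capitalized name is
--     returned.
--
--     :param name: The name to properly capitalize.
--     """
--     # Always capitalize first letter
--     name = name.capitalize()
--
--     indices = []
--     i_hyphen = 0
--     tag_start = 0
--     tag_end = 0
--     i_compound = 0
--     # Search for hyphen can be done before tag, because no form labels
--     # include hyphens--I think.
--     while True:
--         i_hyphen = name.find("-", i_hyphen, len(name)-1)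
--         if i_hyphen == -1:
--             break
--         i_hyphen += 1
--         if i_hyphen < len(name):
--             indices.append(i_hyphen)
--
--     while True:
--         tag_start = name.find("(", tag_start, len(name)-1)
--         if tag_start == -1:
--             break
--         tag_start += 1
--         if tag_start < len(name):
--             indices.append(tag_start)
--         tag_end = name.find(")", tag_start)
--
--         i_compound = tag_start
--         while i_compound != -1:
--             i_compound = name.find(" ", i_compound, tag_end)
--             if i_compound != -1 and i_compound + 1 < len(name):
--                 i_compound += 1
--                 indices.append(i_compound)
--
--     if len(indices) == 0:
--         return name
--
--     list_copy = list(name)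
--     for i in indices:
--         list_copy[i] = list_copy[i].upper()
--
--     return "".join(list_copy)
-- ===== SOURCE B (Python) =====
-- def capitalize_form_label(name):
--     """Single left-to-right pass: capitalize, then uppercase any character whose
--     predecessor is '-' or '(' — or ' ' while inside an unclosed '(' form label."""
--     name = name.capitalize()
--     out = []
--     inside = False
--     prev = None
--     for ch in name:
--         if prev == '-' or prev == '(' or (prev == ' ' and inside):
--             out.append(ch.upper())
--         else:
--             out.append(ch)
--         if ch == '(':
--             inside = True
--         elif ch == ')':
--             inside = False
--         prev = ch
--     return "".join(out)
-- ===== Notes on version B (the rewrite author's own statement) =====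
-- stated objective: simpler
-- what changed: A repeatedly calls str.find to collect an index list (one scan per hyphen, per '(' and per space inside a form label) and then patches a char list; B is a single left-to-right pass that keeps an 'inside parentheses' flag and the previous character and uppercases a character exactly when the previous one is '-', '(' or a space inside an open '(' label.
import Mathlib
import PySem

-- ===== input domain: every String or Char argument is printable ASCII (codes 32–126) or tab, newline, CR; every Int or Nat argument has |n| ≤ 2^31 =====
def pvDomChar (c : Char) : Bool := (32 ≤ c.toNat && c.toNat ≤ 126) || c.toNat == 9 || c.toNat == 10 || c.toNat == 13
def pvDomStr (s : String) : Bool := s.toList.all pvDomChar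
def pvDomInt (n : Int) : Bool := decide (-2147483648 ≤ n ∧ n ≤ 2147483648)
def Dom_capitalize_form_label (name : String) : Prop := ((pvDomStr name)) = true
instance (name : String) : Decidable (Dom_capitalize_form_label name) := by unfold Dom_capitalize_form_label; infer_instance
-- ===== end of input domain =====

-- B replaces A's repeated str.find scans (hyphens, '(' tags, spaces inside a tag) by one
-- left-to-right pass with an inside-parentheses flag; objective: simpler (not faster).

-- str.capitalize, ASCII-exact (PySem has no capitalize): first char uppercased, rest lowercased.
-- Used by both ports as a primitive, exactly like the shared PySem primitives.
def pyCapitalize (cs : List Char) : List Char :=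
  match cs with
  | [] => []
  | c :: rest => PySem.Chars.upperChar c :: PySem.Chars.lower rest

-- ===== PORT A =====
-- the `while True: i_hyphen = name.find("-", i_hyphen, len(name)-1) …` loop;
-- fuel only makes the recursion total (Python's loop always terminates on the same inputs).
def hyLoop (s : List Char) (fuel : Nat) (i : Int) : List Int :=
  match fuel with
  | 0 => []
  | fuel + 1 =>
    let r := PySem.Chars.findFrom s ['-'] i (some ((s.length : Int) - 1))
    if r = -1 then []
    else if r + 1 < (s.length : Int) then (r + 1) :: hyLoop s fuel (r + 1)
    else hyLoop s fuel (r + 1)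

-- the inner `while i_compound != -1: …` loop (the branch that re-reads the same index in
-- Python is kept literally; fuel only makes it total).
def spLoop (s : List Char) (fuel : Nat) (i : Int) (te : Int) : List Int :=
  match fuel with
  | 0 => []
  | fuel + 1 =>
    let r := PySem.Chars.findFrom s [' '] i (some te)
    if r = -1 then []
    else if r + 1 < (s.length : Int) then (r + 1) :: spLoop s fuel (r + 1) te
    else spLoop s fuel r te

-- the outer `while True: tag_start = name.find("(", tag_start, len(name)-1) …` loop.
def pLoop (s : List Char) (fuel : Nat) (ts : Int) : List Int :=
  match fuel with
  | 0 => []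
  | fuel + 1 =>
    let r := PySem.Chars.findFrom s ['('] ts (some ((s.length : Int) - 1))
    if r = -1 then []
    else
      let te := PySem.Chars.findFrom s [')'] (r + 1) none
      (if r + 1 < (s.length : Int) then [r + 1] else [])
        ++ spLoop s (s.length + 1) (r + 1) te
        ++ pLoop s fuel (r + 1)

def capitalize_form_label (name : String) : String :=
  let s := pyCapitalize name.toList
  let indices := hyLoop s (s.length + 1) 0 ++ pLoop s (s.length + 1) 0
  if indices.length = 0 then String.mk s
  else
    String.mk (indices.foldl
      (fun l i => PySem.List.pySetD l i (PySem.Chars.upperChar (PySem.List.pyGetD l i ' ')))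
      s)

-- ===== PORT B =====
-- single pass: state = (output chars, inside-parentheses flag, previous char).
def capitalize_form_label_alt (name : String) : String :=
  let s := pyCapitalize name.toList
  let res := s.foldl
    (fun (st : List Char × Bool × Option Char) ch =>
      let out := if st.2.2 == some '-' || st.2.2 == some '(' || (st.2.2 == some ' ' && st.2.1)
                 then st.1 ++ [PySem.Chars.upperChar ch] else st.1 ++ [ch]
      let inside := if ch == '(' then true else if ch == ')' then false else st.2.1
      (out, inside, some ch))
    ([], false, none)
  String.mk res.1

-- ===== PRECONDITION & SPEC =====
def Spec_capitalize_form_label (name : String) (out : String) : Prop := out = capitalize_form_label_alt name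
instance (name : String) (out : String) : Decidable (Spec_capitalize_form_label name out) := by unfold Spec_capitalize_form_label; infer_instance

-- ===== CLAIM (what is proved, stated in full; the proofs are below) =====
def Claim_equal_capitalize_form_label : Prop := ∀ (name : String), Dom_capitalize_form_label name → Spec_capitalize_form_label name (capitalize_form_label name)

-- ===== LEMMAS AND PROOFS =====

-- `openB s i`: the inside-parentheses flag after scanning s[0..i): some '(' at p < i
-- not followed by a ')' before i.
def openB (s : List Char) (i : Nat) : Bool :=
  (List.range i).any (fun p =>
    (s[p]? == some '(') && (List.range' (p + 1) (i - p - 1)).all (fun q => !(s[q]? == some ')')))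

-- the common character-level condition: position i gets uppercased.
def condB (s : List Char) (i : Nat) : Bool :=
  decide (1 ≤ i) && decide (i < s.length) &&
    (s[i-1]? == some '-' || s[i-1]? == some '(' || (s[i-1]? == some ' ' && openB s i))

def outPrefix (s : List Char) (k : Nat) : List Char :=
  (List.range k).map (fun i => if condB s i then PySem.Chars.upperChar (s.getD i ' ') else s.getD i ' ')

lemma openB_iff (s : List Char) (i : Nat) :
    openB s i = true ↔
      ∃ p : Nat, p < i ∧ s[p]? = some '(' ∧ ∀ q : Nat, p < q → q < i → s[q]? ≠ some ')' := by
  simp only [openB, List.any_eq_true, List.mem_range, Bool.and_eq_true, beq_iff_eq,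
    List.all_eq_true, List.mem_range'_1, Bool.not_eq_true', beq_eq_false_iff_ne, ne_eq]
  constructor
  · rintro ⟨p, hpi, hpc, hall⟩
    exact ⟨p, hpi, hpc, fun q h1 h2 => hall q ⟨h1, by omega⟩⟩
  · rintro ⟨p, hpi, hpc, hall⟩
    exact ⟨p, hpi, hpc, fun q hq => hall q hq.1 (by omega)⟩

lemma openB_succ (s : List Char) (k : Nat) (hk : k < s.length) :
    openB s (k + 1) =
      (if s[k]? == some '(' then true else if s[k]? == some ')' then false else openB s k) := by
  have hk' : s[k]? = some s[k] := List.getElem?_eq_getElem hk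
  by_cases h1 : s[k] = '('
  · rw [hk', h1]
    simp only [beq_self_eq_true, if_true]
    rw [(openB_iff s (k+1)).mpr ⟨k, by omega, by rw [hk', h1], fun q hq1 hq2 => by omega⟩]
  · by_cases h2 : s[k] = ')'
    · rw [hk', h2]
      have e1 : ((some ')' : Option Char) == some '(') = false := by decide
      have e2 : ((some ')' : Option Char) == some ')') = true := by decide
      rw [e1, e2]
      simp only [Bool.false_eq_true, if_false, if_true]
      rw [← Bool.not_eq_true]
      intro hopen
      rcases (openB_iff s (k+1)).mp hopen with ⟨p, hp, hpc, hall⟩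
      rcases Nat.lt_succ_iff_lt_or_eq.mp hp with hp' | hp'
      · exact hall k (by omega) (by omega) (by rw [hk', h2])
      · subst hp'; rw [hk'] at hpc; exact h1 (by injection hpc)
    · rw [hk']
      have e1 : ((some s[k] : Option Char) == some '(') = false := by simp [h1]
      have e2 : ((some s[k] : Option Char) == some ')') = false := by simp [h2]
      rw [e1, e2]
      simp only [Bool.false_eq_true, if_false]
      rw [Bool.eq_iff_iff, openB_iff, openB_iff]
      constructor
      · rintro ⟨p, hp, hpc, hall⟩
        have hpk : p ≠ k := by intro he; subst he; rw [hk'] at hpc; exact h1 (by injection hpc)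
        exact ⟨p, by omega, hpc, fun q hq1 hq2 => hall q hq1 (by omega)⟩
      · rintro ⟨p, hp, hpc, hall⟩
        refine ⟨p, by omega, hpc, fun q hq1 hq2 => ?_⟩
        rcases Nat.lt_succ_iff_lt_or_eq.mp hq2 with hq' | hq'
        · exact hall q hq1 hq'
        · subst hq'; rw [hk']; intro hcon; exact h2 (by injection hcon)

set_option maxRecDepth 4096 in
lemma upperChar_idem (c : Char) :
    PySem.Chars.upperChar (PySem.Chars.upperChar c) = PySem.Chars.upperChar c := by
  unfold PySem.Chars.upperChar
  by_cases h : PySem.Chars.islower c = true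
  · rw [if_pos h]
    have hb : 97 ≤ c.toNat ∧ c.toNat ≤ 122 := by
      simp only [PySem.Chars.islower, Bool.and_eq_true, decide_eq_true_eq, Char.le_def] at h
      exact ⟨h.1, h.2⟩
    have hv : (Char.ofNat (c.toNat - 32)).toNat = c.toNat - 32 := by
      have hvalid : Nat.isValidChar (c.toNat - 32) := Or.inl (by omega)
      rw [Char.ofNat, dif_pos hvalid]
      rfl
    have hlow : ¬ (PySem.Chars.islower (Char.ofNat (c.toNat - 32)) = true) := by
      simp only [PySem.Chars.islower, Bool.and_eq_true, decide_eq_true_eq]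
      rintro ⟨hle, -⟩
      have h97 : 97 ≤ (Char.ofNat (c.toNat - 32)).toNat := Char.le_def.mp hle
      omega
    rw [if_neg hlow]
  · rw [if_neg h, if_neg h]

lemma singleton_prefix_getElem? (c : Char) (l : List Char) (k : Nat) :
    [c] <+: l.drop k ↔ l[k]? = some c := by
  constructor
  · rintro ⟨t, ht⟩
    have hh : (l.drop k).head? = some c := by rw [← ht]; rfl
    rwa [List.head?_drop] at hh
  · intro h
    have hk : k < l.length := by
      by_contra hge
      rw [List.getElem?_eq_none (by omega)] at h
      exact Option.some_ne_none c h.symm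
    have hc : l[k] = c := by
      have := List.getElem?_eq_getElem hk
      rw [h] at this; injection this with h'; exact h'.symm
    exact ⟨l.drop (k+1), by rw [List.drop_eq_getElem_cons hk, hc]; rfl⟩

-- characterization of Python's str.find(c, a, b) with 0 ≤ a, 0 ≤ b ≤ len(s)
lemma find1 (s : List Char) (c : Char) (a b : Nat) (hb : b ≤ s.length) :
    (PySem.Chars.findFrom s [c] (a : Int) (some (b : Int)) = -1 ∧
      ∀ j : Nat, a ≤ j → j < b → s[j]? ≠ some c)
  ∨ (∃ j : Nat, PySem.Chars.findFrom s [c] (a : Int) (some (b : Int)) = (j : Int) ∧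
      a ≤ j ∧ j < b ∧ s[j]? = some c ∧ ∀ k : Nat, a ≤ k → k < j → s[k]? ≠ some c) := by
  have hnb : ¬ ((s.length : Int) < (b : Int)) := by omega
  have hb0 : ¬ ((b : Int) < 0) := by omega
  have ha0 : ¬ ((a : Int) < 0) := by omega
  simp only [PySem.Chars.findFrom, if_neg hnb, if_neg hb0, if_neg ha0]
  by_cases hba : (b : Int) < (a : Int)
  · rw [if_pos hba]
    exact Or.inl ⟨rfl, fun j hj1 hj2 => by omega⟩
  · rw [if_neg hba]
    have hab : a ≤ b := by omega
    set l := List.drop (a : Int).toNat (List.take (b : Int).toNat s) with hl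
    have hl' : l = (s.take b).drop a := by simp [hl]
    have hlen : l.length = b - a := by
      rw [hl']; simp [List.length_drop, List.length_take]; omega
    have hget : ∀ k : Nat, l[k]? = if a + k < b then s[a + k]? else none := by
      intro k
      rw [hl', List.getElem?_drop, List.getElem?_take]
    by_cases hr : PySem.Chars.find l [c] = -1
    · rw [if_pos hr]
      refine Or.inl ⟨rfl, fun j hj1 hj2 hc => ?_⟩
      rw [PySem.Chars.find_eq_neg_one_iff] at hr
      have hex : ∃ m, [c] <+: l.drop m := by
        refine ⟨j - a, ?_⟩
        rw [singleton_prefix_getElem?, hget, if_pos (by omega)]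
        have hj : a + (j - a) = j := by omega
        rw [hj]; exact hc
      exact hr ((PySem.Chars.isIn_iff_infix _ _).mp
        ((PySem.Chars.exists_prefix_drop_iff_isIn _ _).mp hex))
    · rw [if_neg hr]
      have hr0 : 0 ≤ PySem.Chars.find l [c] := by
        have := PySem.Chars.neg_one_le_find l [c]
        omega
      rcases PySem.Chars.find_spec hr0 with ⟨hpre, hmin⟩
      rw [singleton_prefix_getElem?] at hpre
      set r := (PySem.Chars.find l [c]).toNat with hrdef
      have hrb : a + r < b := by
        by_contra hge
        rw [hget r, if_neg hge] at hpre
        exact Option.some_ne_none c hpre.symm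
      refine Or.inr ⟨a + r, ?_, by omega, by omega, ?_, ?_⟩
      · push_cast [hrdef]
        omega
      · rw [hget r, if_pos hrb] at hpre; exact hpre
      · intro k hk1 hk2 hkc
        have hkr : k - a < r := by omega
        apply hmin (k - a) hkr
        rw [singleton_prefix_getElem?, hget, if_pos (by omega)]
        have : a + (k - a) = k := by omega
        rw [this]; exact hkc

lemma findFrom_end_neg_one (s : List Char) (u : List Char) (a : Int) (hn : 1 ≤ s.length) :
    PySem.Chars.findFrom s u a (some (-1)) =
    PySem.Chars.findFrom s u a (some ((s.length - 1 : Nat) : Int)) := by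
  simp only [PySem.Chars.findFrom]
  have h1 : ¬ ((s.length : Int) < -1) := by omega
  have h2 : (-1 : Int) < 0 := by omega
  have h3 : ¬ ((-1 : Int) + (s.length : Int) < 0) := by omega
  have h4 : ¬ ((s.length : Int) < ((s.length - 1 : Nat) : Int)) := by omega
  have h5 : ¬ (((s.length - 1 : Nat) : Int) < 0) := by omega
  have h6 : (-1 : Int) + (s.length : Int) = ((s.length - 1 : Nat) : Int) := by omega
  rw [if_neg h1, if_pos h2, if_neg h3, if_neg h4, if_neg h5, h6]

lemma findFrom_none_eq (s : List Char) (u : List Char) (a : Int) :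
    PySem.Chars.findFrom s u a none =
    PySem.Chars.findFrom s u a (some ((s.length : Nat) : Int)) := by
  simp only [PySem.Chars.findFrom]
  have h4 : ¬ ((s.length : Int) < ((s.length : Nat) : Int)) := by omega
  have h5 : ¬ (((s.length : Nat) : Int) < 0) := by omega
  rw [if_neg h4, if_neg h5]

lemma hy_mem (s : List Char) (hn : 1 ≤ s.length) :
    ∀ (fuel i : Nat), s.length - i ≤ fuel → ∀ x : Int,
      (x ∈ hyLoop s fuel (i : Int) ↔
        ∃ j : Nat, i ≤ j ∧ j + 1 < s.length ∧ s[j]? = some '-' ∧ x = ((j + 1 : Nat) : Int)) := by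
  intro fuel
  induction fuel with
  | zero =>
    intro i hi x
    simp only [hyLoop, List.not_mem_nil, false_iff, not_exists]
    intro j
    rintro ⟨hij, hjn, -, -⟩
    omega
  | succ fuel ih =>
    intro i hi x
    have hcast : ((s.length : Int) - 1) = ((s.length - 1 : Nat) : Int) := by omega
    simp only [hyLoop]
    rw [hcast]
    rcases find1 s '-' i (s.length - 1) (by omega) with ⟨hneg, hnone⟩ | ⟨j0, hj0, hij0, hj0b, hc0, hmin⟩
    · rw [hneg, if_pos rfl]
      simp only [List.not_mem_nil, false_iff, not_exists]
      intro j
      rintro ⟨hij, hjn, hcj, -⟩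
      exact hnone j hij (by omega) hcj
    · rw [hj0, if_neg (by omega : ¬((j0 : Int) = -1)),
        if_pos (by omega : (j0 : Int) + 1 < (s.length : Int))]
      have hc2 : ((j0 : Int) + 1) = ((j0 + 1 : Nat) : Int) := by omega
      rw [hc2, List.mem_cons, ih (j0 + 1) (by omega) x]
      constructor
      · rintro (rfl | ⟨j, hij, hjn, hcj, rfl⟩)
        · exact ⟨j0, by omega, by omega, hc0, rfl⟩
        · exact ⟨j, by omega, hjn, hcj, rfl⟩
      · rintro ⟨j, hij, hjn, hcj, rfl⟩
        rcases Nat.lt_or_ge j j0 with hlt | hge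
        · exact absurd hcj (hmin j hij hlt)
        · rcases Nat.eq_or_lt_of_le hge with rfl | hgt
          · exact Or.inl rfl
          · exact Or.inr ⟨j, by omega, hjn, hcj, rfl⟩

lemma sp_mem (s : List Char) (hn : 1 ≤ s.length) :
    ∀ (fuel i : Nat), s.length - i ≤ fuel → ∀ (te : Int) (b' : Nat),
      ((te = -1 ∧ b' = s.length - 1) ∨ (te = (b' : Int) ∧ b' + 1 ≤ s.length)) →
      ∀ x : Int,
      (x ∈ spLoop s fuel (i : Int) te ↔
        ∃ j : Nat, i ≤ j ∧ j < b' ∧ s[j]? = some ' ' ∧ x = ((j + 1 : Nat) : Int)) := by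
  intro fuel
  induction fuel with
  | zero =>
    intro i hi te b' hte x
    simp only [spLoop, List.not_mem_nil, false_iff, not_exists]
    intro j
    rintro ⟨hij, hjb, -, -⟩
    rcases hte with ⟨-, rfl⟩ | ⟨-, hb⟩ <;> omega
  | succ fuel ih =>
    intro i hi te b' hte x
    have hb'n : b' + 1 ≤ s.length := by rcases hte with ⟨-, rfl⟩ | ⟨-, h⟩ <;> omega
    have hcall : PySem.Chars.findFrom s [' '] (i : Int) (some te) =
        PySem.Chars.findFrom s [' '] (i : Int) (some ((b' : Nat) : Int)) := by
      rcases hte with ⟨rfl, rfl⟩ | ⟨rfl, -⟩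
      · exact findFrom_end_neg_one s [' '] (i : Int) hn
      · rfl
    simp only [spLoop]
    rw [hcall]
    rcases find1 s ' ' i b' (by omega) with ⟨hneg, hnone⟩ | ⟨j0, hj0, hij0, hj0b, hc0, hmin⟩
    · rw [hneg, if_pos rfl]
      simp only [List.not_mem_nil, false_iff, not_exists]
      intro j
      rintro ⟨hij, hjb, hcj, -⟩
      exact hnone j hij hjb hcj
    · rw [hj0, if_neg (by omega : ¬((j0 : Int) = -1)),
        if_pos (by omega : (j0 : Int) + 1 < (s.length : Int))]
      have hc2 : ((j0 : Int) + 1) = ((j0 + 1 : Nat) : Int) := by omega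
      rw [hc2, List.mem_cons, ih (j0 + 1) (by omega) te b' hte x]
      constructor
      · rintro (rfl | ⟨j, hij, hjb, hcj, rfl⟩)
        · exact ⟨j0, by omega, hj0b, hc0, rfl⟩
        · exact ⟨j, by omega, hjb, hcj, rfl⟩
      · rintro ⟨j, hij, hjb, hcj, rfl⟩
        rcases Nat.lt_or_ge j j0 with hlt | hge
        · exact absurd hcj (hmin j hij hlt)
        · rcases Nat.eq_or_lt_of_le hge with rfl | hgt
          · exact Or.inl rfl
          · exact Or.inr ⟨j, by omega, hjb, hcj, rfl⟩

lemma pl_mem (s : List Char) (hn : 1 ≤ s.length) :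
    ∀ (fuel ts : Nat), s.length - ts ≤ fuel → ∀ x : Int,
      (x ∈ pLoop s fuel (ts : Int) ↔
        ∃ p : Nat, ts ≤ p ∧ p + 1 < s.length ∧ s[p]? = some '(' ∧
          (x = ((p + 1 : Nat) : Int) ∨
           ∃ j : Nat, p + 1 ≤ j ∧ j + 1 < s.length ∧ s[j]? = some ' ' ∧
             (∀ q : Nat, p + 1 ≤ q → q ≤ j → s[q]? ≠ some ')') ∧ x = ((j + 1 : Nat) : Int))) := by
  intro fuel
  induction fuel with
  | zero =>
    intro ts hts x
    simp only [pLoop, List.not_mem_nil, false_iff, not_exists]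
    intro p
    rintro ⟨htp, hpb, -, -⟩
    omega
  | succ fuel ih =>
    intro ts hts x
    have hcast : ((s.length : Int) - 1) = ((s.length - 1 : Nat) : Int) := by omega
    simp only [pLoop]
    rw [hcast]
    rcases find1 s '(' ts (s.length - 1) (by omega) with ⟨hneg, hnone⟩ | ⟨p0, hp0, htp0, hp0b, hc0, hmin⟩
    · rw [hneg, if_pos rfl]
      simp only [List.not_mem_nil, false_iff, not_exists]
      intro p
      rintro ⟨htp, hpb, hcp, -⟩
      exact hnone p htp (by omega) hcp
    · rw [hp0, if_neg (by omega : ¬((p0 : Int) = -1))]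
      have hc2 : ((p0 : Int) + 1) = ((p0 + 1 : Nat) : Int) := by omega
      rw [hc2, if_pos (by omega : ((p0 + 1 : Nat) : Int) < (s.length : Int)),
        findFrom_none_eq, List.mem_append, List.mem_append, List.mem_singleton,
        ih (p0 + 1) (by omega) x]
      rcases find1 s ')' (p0 + 1) s.length (le_refl _) with ⟨hneg2, hnone2⟩ | ⟨e0, he0, hpe0, he0b, hce0, hmin2⟩
      · rw [hneg2,
          sp_mem s hn (s.length + 1) (p0 + 1) (by omega) (-1) (s.length - 1) (Or.inl ⟨rfl, rfl⟩) x]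
        constructor
        · rintro ((rfl | ⟨j, hpj, hjb, hcj, rfl⟩) | ⟨p, hpp, hpb, hcp, hinner⟩)
          · exact ⟨p0, htp0, by omega, hc0, Or.inl rfl⟩
          · exact ⟨p0, htp0, by omega, hc0,
              Or.inr ⟨j, hpj, by omega, hcj, fun q hq1 hq2 => hnone2 q hq1 (by omega), rfl⟩⟩
          · exact ⟨p, by omega, hpb, hcp, hinner⟩
        · rintro ⟨p, htp, hpb, hcp, hinner⟩
          rcases Nat.lt_or_ge p p0 with hlt | hge
          · exact absurd hcp (hmin p htp (by omega))
          · rcases Nat.eq_or_lt_of_le hge with rfl | hgt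
            · rcases hinner with rfl | ⟨j, hpj, hjb, hcj, hnoq, rfl⟩
              · exact Or.inl (Or.inl rfl)
              · exact Or.inl (Or.inr ⟨j, hpj, by omega, hcj, rfl⟩)
            · exact Or.inr ⟨p, by omega, hpb, hcp, hinner⟩
      · rw [he0,
          sp_mem s hn (s.length + 1) (p0 + 1) (by omega) ((e0 : Nat) : Int) e0 (Or.inr ⟨rfl, by omega⟩) x]
        constructor
        · rintro ((rfl | ⟨j, hpj, hjb, hcj, rfl⟩) | ⟨p, hpp, hpb, hcp, hinner⟩)
          · exact ⟨p0, htp0, by omega, hc0, Or.inl rfl⟩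
          · exact ⟨p0, htp0, by omega, hc0,
              Or.inr ⟨j, hpj, by omega, hcj, fun q hq1 hq2 hqc => hmin2 q hq1 (by omega) hqc, rfl⟩⟩
          · exact ⟨p, by omega, hpb, hcp, hinner⟩
        · rintro ⟨p, htp, hpb, hcp, hinner⟩
          rcases Nat.lt_or_ge p p0 with hlt | hge
          · exact absurd hcp (hmin p htp (by omega))
          · rcases Nat.eq_or_lt_of_le hge with rfl | hgt
            · rcases hinner with rfl | ⟨j, hpj, hjb, hcj, hnoq, rfl⟩
              · exact Or.inl (Or.inl rfl)
              · refine Or.inl (Or.inr ⟨j, hpj, ?_, hcj, rfl⟩)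
                by_contra hje
                exact hnoq e0 hpe0 (by omega) hce0
            · exact Or.inr ⟨p, by omega, hpb, hcp, hinner⟩

lemma condB_iff (s : List Char) (i : Nat) :
    condB s i = true ↔ 1 ≤ i ∧ i < s.length ∧
      (s[i-1]? = some '-' ∨ s[i-1]? = some '(' ∨ (s[i-1]? = some ' ' ∧ openB s i = true)) := by
  simp [condB, Bool.and_eq_true, Bool.or_eq_true, decide_eq_true_eq, beq_iff_eq, and_assoc]
  intro _ _
  tauto

lemma indices_mem (s : List Char) (hn : 1 ≤ s.length) (x : Int) :
    x ∈ (hyLoop s (s.length + 1) 0 ++ pLoop s (s.length + 1) 0) ↔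
      ∃ i : Nat, x = (i : Int) ∧ condB s i = true := by
  have h1 := hy_mem s hn (s.length + 1) 0 (by omega) x
  have h2 := pl_mem s hn (s.length + 1) 0 (by omega) x
  rw [Nat.cast_zero] at h1 h2
  rw [List.mem_append, h1, h2]
  constructor
  · rintro (⟨j, -, hjn, hcj, rfl⟩ | ⟨p, -, hpn, hcp, hinner⟩)
    · refine ⟨j + 1, rfl, (condB_iff s (j + 1)).mpr ⟨by omega, by omega, ?_⟩⟩
      simp only [Nat.add_sub_cancel]
      exact Or.inl hcj
    · rcases hinner with rfl | ⟨j, hpj, hjn, hcj, hnoq, rfl⟩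
      · refine ⟨p + 1, rfl, (condB_iff s (p + 1)).mpr ⟨by omega, by omega, ?_⟩⟩
        simp only [Nat.add_sub_cancel]
        exact Or.inr (Or.inl hcp)
      · refine ⟨j + 1, rfl, (condB_iff s (j + 1)).mpr ⟨by omega, by omega, ?_⟩⟩
        simp only [Nat.add_sub_cancel]
        exact Or.inr (Or.inr ⟨hcj,
          (openB_iff s (j + 1)).mpr ⟨p, by omega, hcp, fun q hq1 hq2 => hnoq q (by omega) (by omega)⟩⟩)
  · rintro ⟨i, rfl, hcond⟩
    rcases (condB_iff s i).mp hcond with ⟨h1, h2, hdis⟩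
    obtain ⟨j, rfl⟩ : ∃ j, i = j + 1 := ⟨i - 1, by omega⟩
    simp only [Nat.add_sub_cancel] at hdis
    rcases hdis with hc | hc | ⟨hc, hop⟩
    · exact Or.inl ⟨j, by omega, by omega, hc, rfl⟩
    · exact Or.inr ⟨j, by omega, by omega, hc, Or.inl rfl⟩
    · rcases (openB_iff s (j + 1)).mp hop with ⟨p, hp, hcp, hall⟩
      have hpj : p < j := by
        by_contra hge
        have hpe : p = j := by omega
        rw [hpe, hc] at hcp
        exact absurd (Option.some.inj hcp) (by decide)
      exact Or.inr ⟨p, by omega, by omega, hcp,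
        Or.inr ⟨j, by omega, by omega, hc, fun q hq1 hq2 => hall q (by omega) (by omega), rfl⟩⟩

lemma fold_sets (idxs : List Int) (u : List Char)
    (h : ∀ x ∈ idxs, ∃ i : Nat, x = (i : Int) ∧ i < u.length) :
    (idxs.foldl
        (fun l i => PySem.List.pySetD l i (PySem.Chars.upperChar (PySem.List.pyGetD l i ' ')))
        u).length = u.length ∧
    ∀ j : Nat,
      (idxs.foldl
        (fun l i => PySem.List.pySetD l i (PySem.Chars.upperChar (PySem.List.pyGetD l i ' ')))
        u)[j]? = if (j : Int) ∈ idxs then (u[j]?).map PySem.Chars.upperChar else u[j]? := by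
  induction idxs generalizing u with
  | nil => exact ⟨rfl, fun j => by simp⟩
  | cons x rest ih =>
    obtain ⟨i0, rfl, hi0⟩ := h x (List.mem_cons_self ..)
    simp only [List.foldl_cons]
    rw [PySem.List.pySetD_natCast, PySem.List.pyGetD_natCast]
    have hrest : ∀ y ∈ rest, ∃ i : Nat, y = (i : Int) ∧
        i < (u.set i0 (PySem.Chars.upperChar (u.getD i0 ' '))).length := by
      intro y hy
      obtain ⟨i, hyi, hiu⟩ := h y (List.mem_cons_of_mem _ hy)
      exact ⟨i, hyi, by simpa using hiu⟩
    obtain ⟨clen, cget⟩ := ih (u.set i0 (PySem.Chars.upperChar (u.getD i0 ' '))) hrest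
    refine ⟨by rw [clen]; simp, fun j => ?_⟩
    rw [cget j, List.getElem?_set]
    by_cases hji : i0 = j
    · subst hji
      rw [if_pos (List.mem_cons_self ..)]
      by_cases hr : ((i0 : Int) ∈ rest)
      · rw [if_pos hr, if_pos rfl, if_pos hi0, List.getElem?_eq_getElem hi0]
        simp only [Option.map_some]
        rw [upperChar_idem, List.getD_eq_getElem u ' ' hi0]
      · rw [if_neg hr, if_pos rfl, if_pos hi0, List.getElem?_eq_getElem hi0]
        simp only [Option.map_some]
        rw [List.getD_eq_getElem u ' ' hi0]
    · rw [if_neg hji]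
      by_cases hjr : ((j : Int) ∈ rest)
      · rw [if_pos hjr, if_pos (List.mem_cons_of_mem _ hjr)]
      · rw [if_neg hjr, if_neg ?_]
        rw [List.mem_cons]
        rintro (h' | h')
        · exact hji (by exact_mod_cast h'.symm)
        · exact hjr h'

lemma outPrefix_getElem? (s : List Char) (k j : Nat) :
    (outPrefix s k)[j]? =
      if j < k then
        some (if condB s j then PySem.Chars.upperChar (s.getD j ' ') else s.getD j ' ')
      else none := by
  by_cases hj : j < k
  · rw [if_pos hj]
    rw [outPrefix, List.getElem?_map, List.getElem?_range hj]
    rfl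
  · rw [if_neg hj, List.getElem?_eq_none]
    simp [outPrefix]
    omega

lemma outPrefix_succ (s : List Char) (k : Nat) :
    outPrefix s (k + 1) = outPrefix s k ++
      [if condB s k then PySem.Chars.upperChar (s.getD k ' ') else s.getD k ' '] := by
  simp [outPrefix, List.range_succ]

lemma portA_eq (name : String) :
    capitalize_form_label name = String.mk (outPrefix (pyCapitalize name.toList) (pyCapitalize name.toList).length) := by
  simp only [capitalize_form_label]
  rcases Nat.eq_zero_or_pos (pyCapitalize name.toList).length with h0 | hn
  · have hs : pyCapitalize name.toList = [] := List.eq_nil_of_length_eq_zero h0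
    rw [hs]
    decide
  · set s := pyCapitalize name.toList with hsdef
    have him := fun x => indices_mem s hn x
    set idxs := hyLoop s (s.length + 1) 0 ++ pLoop s (s.length + 1) 0 with hidx
    by_cases hemp : idxs.length = 0
    · rw [if_pos hemp]
      have hnoc : ∀ i : Nat, condB s i ≠ true := by
        intro i hcb
        have hm : ((i : Int)) ∈ idxs := (him (i : Int)).mpr ⟨i, rfl, hcb⟩
        rw [List.eq_nil_of_length_eq_zero hemp] at hm
        exact List.not_mem_nil hm
      refine congrArg String.mk (List.ext_getElem? fun j => ?_)
      rw [outPrefix_getElem?]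
      by_cases hj : j < s.length
      · rw [if_pos hj, if_neg (hnoc j), List.getElem?_eq_getElem hj,
          List.getD_eq_getElem s ' ' hj]
      · rw [if_neg hj, List.getElem?_eq_none (by omega)]
    · rw [if_neg hemp]
      have hdom : ∀ x ∈ idxs, ∃ i : Nat, x = (i : Int) ∧ i < s.length := by
        intro x hx
        obtain ⟨i, rfl, hci⟩ := (him x).mp hx
        exact ⟨i, rfl, ((condB_iff s i).mp hci).2.1⟩
      obtain ⟨hlen, hget⟩ := fold_sets idxs s hdom
      refine congrArg String.mk (List.ext_getElem? fun j => ?_)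
      rw [hget j, outPrefix_getElem?]
      have hiff : ((j : Int) ∈ idxs) ↔ condB s j = true := by
        rw [him (j : Int)]
        constructor
        · rintro ⟨i, hji, hci⟩
          rwa [(by exact_mod_cast hji : j = i)]
        · intro h
          exact ⟨j, rfl, h⟩
      by_cases hj : j < s.length
      · rw [if_pos hj]
        by_cases hcb : condB s j = true
        · rw [if_pos (hiff.mpr hcb), if_pos hcb, List.getElem?_eq_getElem hj]
          simp only [Option.map_some]
          rw [List.getD_eq_getElem s ' ' hj]
        · rw [if_neg (fun hm => hcb (hiff.mp hm)), if_neg hcb, List.getElem?_eq_getElem hj,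
            List.getD_eq_getElem s ' ' hj]
      · rw [if_neg hj, if_neg (fun hm => hj (((condB_iff s j).mp (hiff.mp hm)).2.1)),
          List.getElem?_eq_none (by omega)]

lemma B_loop (s : List Char) :
    ∀ k, k ≤ s.length →
      ((s.take k).foldl
        (fun (st : List Char × Bool × Option Char) ch =>
          let out := if st.2.2 == some '-' || st.2.2 == some '(' || (st.2.2 == some ' ' && st.2.1)
                     then st.1 ++ [PySem.Chars.upperChar ch] else st.1 ++ [ch]
          let inside := if ch == '(' then true else if ch == ')' then false else st.2.1
          (out, inside, some ch))
        ([], false, none))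
      = (outPrefix s k, openB s k, if k = 0 then none else s[k-1]?) := by
  intro k
  induction k with
  | zero => simp [outPrefix, openB]
  | succ k ih =>
    intro hk
    have hk' : k < s.length := by omega
    rw [List.take_succ_eq_append_getElem hk', List.foldl_append, ih (by omega)]
    simp only [List.foldl_cons, List.foldl_nil]
    have hv : s.getD k ' ' = s[k] := List.getD_eq_getElem s ' ' hk'
    have hcond : ((if k = 0 then (none : Option Char) else s[k-1]?) == some '-' ||
        (if k = 0 then (none : Option Char) else s[k-1]?) == some '(' ||
        ((if k = 0 then (none : Option Char) else s[k-1]?) == some ' ' && openB s k)) =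
        condB s k := by
      rcases Nat.eq_zero_or_pos k with rfl | hkpos
      · simp [condB]
      · rw [if_neg (by omega : ¬ (k = 0)), condB]
        have hp : s[k-1]? = some s[k-1] := List.getElem?_eq_getElem (by omega)
        rw [hp]
        have e1 : decide (1 ≤ k) = true := decide_eq_true hkpos
        have e2 : decide (k < s.length) = true := decide_eq_true hk'
        rw [e1, e2]
        simp only [Bool.true_and]
    rw [hcond]
    have hA1 : (if condB s k then outPrefix s k ++ [PySem.Chars.upperChar s[k]]
        else outPrefix s k ++ [s[k]]) = outPrefix s (k + 1) := by
      rw [outPrefix_succ, hv]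
      by_cases hc : condB s k <;> simp [hc]
    have hA2 : (if s[k] == '(' then true else if s[k] == ')' then false else openB s k) =
        openB s (k + 1) := by
      rw [openB_succ s k hk', List.getElem?_eq_getElem hk']
      rfl
    have hA3 : (some s[k] : Option Char) = if k + 1 = 0 then none else s[k+1-1]? := by
      simp [List.getElem?_eq_getElem hk']
    exact Prod.ext hA1 (Prod.ext hA2 hA3)

lemma portB_eq (name : String) :
    capitalize_form_label_alt name = String.mk (outPrefix (pyCapitalize name.toList) (pyCapitalize name.toList).length) := by
  simp only [capitalize_form_label_alt]
  have h := B_loop (pyCapitalize name.toList) (pyCapitalize name.toList).length (le_refl _)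
  rw [List.take_length] at h
  rw [h]

-- ===== VERDICT (by name: the statement is the Claim_ definition above) =====
theorem capitalize_form_label_spec : Claim_equal_capitalize_form_label := by
  intro name _
  unfold Spec_capitalize_form_label
  rw [portA_eq, portB_eq]
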